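-- pv_equiv track=rewrite | github.com/chicho69-cesar/adventJS-2024 | src/challenge-14/index.py | min_moves_to_stables
-- ===== SOURCE A (Python) =====
-- def min_moves_to_stables(reindeer, stables):
--   reindeer_sorted = sorted(reindeer)
--   stables_sorted = sorted(stables)
--   total = 0
--
--   for reinder in reindeer_sorted:
--     position_to_remove = 0
--
--     min_distance = float('inf')
--     for idx, stable in enumerate(stables_sorted):
--       distance = abs(stable - reinder)
--       if distance < min_distance:
--         position_to_remove = idx
--         min_distance = distance
--
--     total += min_distance
--     stables_sorted.pop(position_to_remove)
--
--   return total
-- ===== SOURCE B (Python) =====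
-- def min_moves_to_stables(reindeer, stables):
--   st = sorted(stables)
--   total = 0
--
--   for r in sorted(reindeer):
--     # binary search for the first stable position >= r
--     lo, hi = 0, len(st)
--     while lo < hi:
--       mid = (lo + hi) // 2
--       if st[mid] < r:
--         lo = mid + 1
--       else:
--         hi = mid
--
--     if lo == len(st):
--       v = st[-1]
--     elif lo == 0:
--       v = st[0]
--     elif r - st[lo - 1] <= st[lo] - r:
--       v = st[lo - 1]
--     else:
--       v = st[lo]
--
--     total += abs(v - r)
--     st.remove(v)
--
--   return total
-- ===== Notes on version B (the rewrite author's own statement) =====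
-- stated objective: faster
-- what changed: Instead of a full linear scan over all remaining stables to find the first-minimal-distance index and pop it, B binary-searches the sorted stable list for the insertion point of each reindeer, picks the nearer of the two neighbouring stables (tie toward the smaller), and removes it by value.
import Mathlib
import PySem

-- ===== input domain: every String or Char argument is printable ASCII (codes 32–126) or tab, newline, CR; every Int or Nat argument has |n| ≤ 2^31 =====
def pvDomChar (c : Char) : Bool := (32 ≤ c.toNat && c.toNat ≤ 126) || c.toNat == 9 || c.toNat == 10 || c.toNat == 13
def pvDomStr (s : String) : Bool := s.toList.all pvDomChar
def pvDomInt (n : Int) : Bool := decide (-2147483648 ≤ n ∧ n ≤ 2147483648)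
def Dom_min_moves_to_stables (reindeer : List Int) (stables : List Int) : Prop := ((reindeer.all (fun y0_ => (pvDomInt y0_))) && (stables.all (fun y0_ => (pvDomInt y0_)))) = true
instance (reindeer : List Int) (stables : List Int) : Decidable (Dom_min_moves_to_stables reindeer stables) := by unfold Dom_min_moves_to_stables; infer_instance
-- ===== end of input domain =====

-- ===== PORT A =====
-- B replaces A's linear argmin scan over the remaining stables by a binary search
-- in the sorted stable list plus removal by value (faster by a constant factor).
-- A sorts its local copies only; neither caller-visible argument is mutated.
def aInner (st : List Int) (r : Int) : Int × Option Int :=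
  (PySem.List.enumerate st).foldl (fun acc p =>
    let d := |p.2 - r|
    match acc.2 with
    | none => (p.1, some d)
    | some m => if d < m then (p.1, some d) else acc) (0, none)

def aLoop : List Int → List Int → Int → Int
  | [], _, total => total
  | r :: rs, st, total =>
      let pm := aInner st r
      let total' := total + pm.2.getD 0
      match PySem.List.pop? st pm.1 with
      | some (_, st') => aLoop rs st' total'
      | none => total'

def min_moves_to_stables (reindeer : List Int) (stables : List Int) : Int :=
  aLoop (PySem.List.sorted reindeer (fun x => x)) (PySem.List.sorted stables (fun x => x)) 0

-- ===== PORT B =====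
def bSearch (st : List Int) (r : Int) (lo hi : Nat) : Nat :=
  if lo < hi then
    let mid := (lo + hi) / 2
    if st.getD mid 0 < r then bSearch st r (mid + 1) hi
    else bSearch st r lo mid
  else lo
termination_by hi - lo
decreasing_by all_goals omega

def bStep (st : List Int) (r : Int) : Int :=
  let lo := bSearch st r 0 st.length
  if lo = st.length then st.getD (st.length - 1) 0
  else if lo = 0 then st.getD 0 0
  else if r - st.getD (lo - 1) 0 ≤ st.getD lo 0 - r then st.getD (lo - 1) 0
  else st.getD lo 0

def bLoop : List Int → List Int → Int → Int
  | [], _, total => total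
  | r :: rs, st, total =>
      let v := bStep st r
      let total' := total + |v - r|
      match PySem.List.remove? st v with
      | some st' => bLoop rs st' total'
      | none => total'

def min_moves_to_stables_alt (reindeer : List Int) (stables : List Int) : Int :=
  bLoop (PySem.List.sorted reindeer (fun x => x)) (PySem.List.sorted stables (fun x => x)) 0

-- ===== PRECONDITION & SPEC =====
-- A raises IndexError (pop from an empty list) exactly when there are more reindeer than
-- stables; B's binary-search step raises there too. Pre_ admits exactly the inputs where A returns.
def Pre_min_moves_to_stables (reindeer : List Int) (stables : List Int) : Prop :=
  reindeer.length ≤ stables.length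
instance (reindeer : List Int) (stables : List Int) : Decidable (Pre_min_moves_to_stables reindeer stables) := by
  unfold Pre_min_moves_to_stables; infer_instance

def pvWitness_min_moves_to_stables : List Int × List Int := ([2, 6], [1, 5, 9])

def Spec_min_moves_to_stables (reindeer : List Int) (stables : List Int) (out : Int) : Prop := out = min_moves_to_stables_alt reindeer stables
instance (reindeer : List Int) (stables : List Int) (out : Int) : Decidable (Spec_min_moves_to_stables reindeer stables out) := by unfold Spec_min_moves_to_stables; infer_instance

-- ===== CLAIM (what is proved, stated in full; the proofs are below) =====
def Claim_equal_min_moves_to_stables : Prop := ∀ (reindeer : List Int) (stables : List Int), Dom_min_moves_to_stables reindeer stables → Pre_min_moves_to_stables reindeer stables → Spec_min_moves_to_stables reindeer stables (min_moves_to_stables reindeer stables)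

-- ===== LEMMAS AND PROOFS =====

-- mirror of aInner's fold once the first element has replaced the infinite initial distance
def aAux (r : Int) : List Int → Int → Int → Int → Int × Int
  | [], _, p, m => (p, m)
  | x :: t, s, p, m => if |x - r| < m then aAux r t (s + 1) s |x - r| else aAux r t (s + 1) p m

lemma fold_eq_aAux (r : Int) : ∀ (t : List Int) (s p m : Int),
    (PySem.List.enumerate t s).foldl (fun acc q =>
      let d := |q.2 - r|
      match acc.2 with
      | none => (q.1, some d)
      | some m' => if d < m' then (q.1, some d) else acc) (p, some m)
    = ((aAux r t s p m).1, some (aAux r t s p m).2) := by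
  intro t
  induction t with
  | nil => intro s p m; simp [PySem.List.enumerate_nil, aAux]
  | cons x tl ih =>
    intro s p m
    rw [PySem.List.enumerate_cons]
    by_cases h : |x - r| < m
    · simp only [List.foldl_cons, aAux, h, if_true]
      simpa using ih (s + 1) s |x - r|
    · simp only [List.foldl_cons, aAux, h, if_false]
      simpa [h] using ih (s + 1) p m

lemma aInner_eq_aAux (r : Int) (x : Int) (t : List Int) :
    aInner (x :: t) r = ((aAux r t 1 0 |x - r|).1, some (aAux r t 1 0 |x - r|).2) := by
  unfold aInner
  rw [PySem.List.enumerate_cons]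
  simpa using fold_eq_aAux r t 1 0 |x - r|

lemma aAux_char (r : Int) : ∀ (t : List Int) (s p m : Int),
    (aAux r t s p m).2 ≤ m ∧
    (∀ (j : Nat) (hj : j < t.length), (aAux r t s p m).2 ≤ |t[j] - r|) ∧
    ((aAux r t s p m) = (p, m) ∨
      ∃ (k : Nat) (hk : k < t.length), (aAux r t s p m).1 = s + (k : Int) ∧
        (aAux r t s p m).2 = |t[k] - r| ∧ |t[k] - r| < m ∧
        ∀ (j : Nat) (hjk : j < k), (aAux r t s p m).2 < |t[j]'(by omega) - r|) := by
  intro t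
  induction t with
  | nil => intro s p m; exact ⟨le_refl _, by simp, Or.inl rfl⟩
  | cons x tl ih =>
    intro s p m
    by_cases h : |x - r| < m
    · have hrec := ih (s + 1) s (|x - r|)
      obtain ⟨h1, h2, h3⟩ := hrec
      simp only [aAux, h, if_true]
      refine ⟨le_of_lt (lt_of_le_of_lt h1 h), ?_, ?_⟩
      · intro j hj
        match j with
        | 0 => simpa using h1
        | j + 1 => simpa using h2 j (by simpa using hj)
      · right
        rcases h3 with heq | ⟨k', hk', e1, e2, e3, e4⟩
        · exact ⟨0, by simp, by simp [heq], by simp [heq], h, fun j hj => absurd hj (Nat.not_lt_zero j)⟩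
        · refine ⟨k' + 1, by simpa using Nat.succ_lt_succ hk', by push_cast [e1]; ring, by simpa using e2, lt_trans e3 h, ?_⟩
          intro j hj
          match j with
          | 0 => simpa using lt_of_le_of_lt (le_of_eq e2) e3
          | j + 1 => simpa using e4 j (by omega)
    · have hrec := ih (s + 1) p m
      obtain ⟨h1, h2, h3⟩ := hrec
      simp only [aAux, h, if_false]
      rw [not_lt] at h
      refine ⟨h1, ?_, ?_⟩
      · intro j hj
        match j with
        | 0 => simpa using le_trans h1 h
        | j + 1 => simpa using h2 j (by simpa using hj)
      · rcases h3 with heq | ⟨k', hk', e1, e2, e3, e4⟩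
        · exact Or.inl heq
        · refine Or.inr ⟨k' + 1, by simpa using Nat.succ_lt_succ hk', by push_cast [e1]; ring, by simpa using e2, e3, ?_⟩
          intro j hj
          match j with
          | 0 => simpa [e2] using lt_of_lt_of_le e3 h
          | j + 1 => simpa using e4 j (by omega)

/-- characterization of A's inner scan on a nonempty list: first argmin index and min distance -/
lemma aInner_char (r : Int) (st : List Int) (hne : st ≠ []) :
    ∃ (k : Nat) (hk : k < st.length),
      aInner st r = ((k : Int), some |st[k] - r|) ∧
      (∀ (j : Nat) (hj : j < st.length), |st[k] - r| ≤ |st[j] - r|) ∧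
      (∀ (j : Nat) (hj : j < st.length), j < k → |st[k] - r| < |st[j] - r|) := by
  obtain ⟨x, t, rfl⟩ : ∃ x t, st = x :: t := by
    cases st with
    | nil => exact absurd rfl hne
    | cons x t => exact ⟨x, t, rfl⟩
  obtain ⟨h1, h2, h3⟩ := aAux_char r t 1 0 (|x - r|)
  rw [aInner_eq_aAux]
  rcases h3 with heq | ⟨k', hk', e1, e2, e3, e4⟩
  · refine ⟨0, by simp, by simp [heq], ?_, by omega⟩
    intro j hj
    match j with
    | 0 => simp
    | j + 1 =>
      have := h2 j (by simpa using hj)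
      rw [heq] at this
      simpa using this
  · refine ⟨k' + 1, by simpa using Nat.succ_lt_succ hk', ?_, ?_, ?_⟩
    · have : ((k' + 1 : Nat) : Int) = 1 + (k' : Int) := by push_cast; ring
      simp [e1, e2, this]
    · intro j hj
      match j with
      | 0 =>
        simpa [e2] using le_of_lt e3
      | j + 1 =>
        have := h2 j (by simpa using hj)
        rw [e2] at this
        simpa using this
    · intro j hj hjk
      match j with
      | 0 =>
        simpa [e2] using e3
      | j + 1 =>
        have := e4 j (by omega)
        rw [e2] at this
        simpa using this

lemma bSearch_eq (st : List Int) (r : Int) (lo hi : Nat) (h : lo < hi) :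
    bSearch st r lo hi =
      if st.getD ((lo + hi) / 2) 0 < r then bSearch st r ((lo + hi) / 2 + 1) hi
      else bSearch st r lo ((lo + hi) / 2) := by
  rw [bSearch]
  simp [h]

lemma bSearch_spec (st : List Int) (r : Int)
    (hmono : ∀ (i j : Nat), i ≤ j → j < st.length → st.getD i 0 ≤ st.getD j 0) :
    ∀ (n lo hi : Nat), hi - lo = n → lo ≤ hi → hi ≤ st.length →
      lo ≤ bSearch st r lo hi ∧ bSearch st r lo hi ≤ hi ∧
      (∀ j : Nat, lo ≤ j → j < bSearch st r lo hi → st.getD j 0 < r) ∧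
      (∀ j : Nat, bSearch st r lo hi ≤ j → j < hi → r ≤ st.getD j 0) := by
  intro n
  induction n using Nat.strong_induction_on with
  | _ n ih =>
    intro lo hi hn hlohi hhi
    by_cases hlh : lo < hi
    · have hm1 : lo ≤ (lo + hi) / 2 := by omega
      have hm2 : (lo + hi) / 2 < hi := by omega
      by_cases hcmp : st.getD ((lo + hi) / 2) 0 < r
      · rw [bSearch_eq st r lo hi hlh, if_pos hcmp]
        obtain ⟨a1, a2, a3, a4⟩ := ih (hi - ((lo + hi) / 2 + 1)) (by omega) ((lo + hi) / 2 + 1) hi rfl (by omega) hhi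
        refine ⟨by omega, a2, ?_, a4⟩
        intro j hj1 hj2
        by_cases hjm : j ≤ (lo + hi) / 2
        · exact lt_of_le_of_lt (hmono j ((lo + hi) / 2) hjm (by omega)) hcmp
        · exact a3 j (by omega) hj2
      · rw [bSearch_eq st r lo hi hlh, if_neg hcmp]
        obtain ⟨a1, a2, a3, a4⟩ := ih ((lo + hi) / 2 - lo) (by omega) lo ((lo + hi) / 2) rfl (by omega) (by omega)
        refine ⟨a1, by omega, a3, ?_⟩
        intro j hj1 hj2
        by_cases hjm : (lo + hi) / 2 ≤ j
        · exact le_trans (not_lt.mp hcmp) (hmono ((lo + hi) / 2) j hjm (by omega))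
        · exact a4 j hj1 (by omega)
    · rw [bSearch, if_neg hlh]
      exact ⟨le_refl _, by omega, fun j h1 h2 => by omega, fun j h1 h2 => by omega⟩

/-- characterization of B's choice on a sorted nonempty list -/
lemma bStep_char (r : Int) (st : List Int) (hne : st ≠ [])
    (hs : st.Pairwise (· ≤ ·)) :
    (∃ (i : Nat) (hi : i < st.length), st[i] = bStep st r) ∧
    (∀ (j : Nat) (hj : j < st.length), |bStep st r - r| ≤ |st[j] - r|) ∧
    (∀ (j : Nat) (hj : j < st.length), |st[j] - r| = |bStep st r - r| → bStep st r ≤ st[j]) := by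
  have hlen : 0 < st.length := List.length_pos_of_ne_nil hne
  have hmonoE : ∀ (i j : Nat) (hi : i < st.length) (hj : j < st.length), i ≤ j → st[i] ≤ st[j] := by
    intro i j hi hj hij
    rcases Nat.eq_or_lt_of_le hij with rfl | hlt
    · exact le_refl _
    · exact List.pairwise_iff_getElem.mp hs i j hi hj hlt
  have hmono : ∀ (i j : Nat), i ≤ j → j < st.length → st.getD i 0 ≤ st.getD j 0 := by
    intro i j hij hj
    rw [List.getD_eq_getElem st 0 (by omega), List.getD_eq_getElem st 0 hj]
    exact hmonoE i j (by omega) hj hij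
  obtain ⟨b1, b2, b3, b4⟩ := bSearch_spec st r hmono st.length 0 st.length rfl (by omega) (le_refl _)
  set lo := bSearch st r 0 st.length with hlo
  have hlt : ∀ (j : Nat) (hj : j < st.length), j < lo → st[j] < r := by
    intro j hj hjlo
    have := b3 j (Nat.zero_le _) hjlo
    rwa [List.getD_eq_getElem st 0 hj] at this
  have hge : ∀ (j : Nat) (hj : j < st.length), lo ≤ j → r ≤ st[j] := by
    intro j hj hjlo
    have := b4 j hjlo hj
    rwa [List.getD_eq_getElem st 0 hj] at this
  have habs : ∀ a : Int, |a - r| = if a < r then r - a else a - r := by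
    intro a
    by_cases h : a < r
    · rw [if_pos h, abs_of_neg (by omega)]; ring
    · rw [if_neg h, abs_of_nonneg (by omega)]
  have hbv : bStep st r =
      (if lo = st.length then st.getD (st.length - 1) 0
       else if lo = 0 then st.getD 0 0
       else if r - st.getD (lo - 1) 0 ≤ st.getD lo 0 - r then st.getD (lo - 1) 0
       else st.getD lo 0) := rfl
  by_cases hA : lo = st.length
  · have hveq : bStep st r = st[st.length - 1] := by
      rw [hbv, if_pos hA, List.getD_eq_getElem st 0 (by omega)]
    have hvlt : st[st.length - 1] < r := hlt (st.length - 1) (by omega) (by omega)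
    refine ⟨⟨st.length - 1, by omega, hveq.symm⟩, ?_, ?_⟩
    · intro j hj
      have e1 := hlt j hj (by omega)
      have e2 := hmonoE j (st.length - 1) hj (by omega) (by omega)
      rw [hveq, habs, habs]
      split_ifs <;> omega
    · intro j hj
      have e1 := hlt j hj (by omega)
      rw [hveq, habs, habs]
      split_ifs <;> omega
  · by_cases hB : lo = 0
    · have hveq : bStep st r = st[0] := by
        rw [hbv, if_neg hA, if_pos hB, List.getD_eq_getElem st 0 (by omega)]
      have hvge : r ≤ st[0] := hge 0 hlen (by omega)
      refine ⟨⟨0, hlen, hveq.symm⟩, ?_, ?_⟩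
      · intro j hj
        have e1 := hge j hj (by omega)
        have e2 := hmonoE 0 j hlen hj (by omega)
        rw [hveq, habs, habs]
        split_ifs <;> omega
      · intro j hj
        have e1 := hge j hj (by omega)
        have e2 := hmonoE 0 j hlen hj (by omega)
        rw [hveq, habs, habs]
        split_ifs <;> omega
    · have hlo1 : lo - 1 < st.length := by omega
      have hlolen : lo < st.length := by omega
      have ha : st[lo - 1] < r := hlt (lo - 1) hlo1 (by omega)
      have hc : r ≤ st[lo] := hge lo hlolen (by omega)
      have hbv' : bStep st r =
          (if r - st[lo - 1] ≤ st[lo] - r then st[lo - 1] else st[lo]) := by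
        rw [hbv, if_neg hA, if_neg hB, List.getD_eq_getElem st 0 hlo1, List.getD_eq_getElem st 0 hlolen]
      have hjfacts : ∀ (j : Nat) (hj : j < st.length),
          (j < lo → st[j] ≤ st[lo - 1] ∧ st[j] < r) ∧ (lo ≤ j → st[lo] ≤ st[j] ∧ r ≤ st[j]) := by
        intro j hj
        constructor
        · intro h
          exact ⟨hmonoE j (lo - 1) hj hlo1 (by omega), hlt j hj h⟩
        · intro h
          exact ⟨hmonoE lo j hlolen hj h, hge j hj h⟩
      by_cases hC : r - st[lo - 1] ≤ st[lo] - r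
      · have hveq : bStep st r = st[lo - 1] := by rw [hbv', if_pos hC]
        refine ⟨⟨lo - 1, hlo1, hveq.symm⟩, ?_, ?_⟩
        · intro j hj
          obtain ⟨f1, f2⟩ := hjfacts j hj
          rw [hveq, habs, habs]
          by_cases hjlo : j < lo
          · obtain ⟨g1, g2⟩ := f1 hjlo
            split_ifs <;> omega
          · obtain ⟨g1, g2⟩ := f2 (by omega)
            split_ifs <;> omega
        · intro j hj
          obtain ⟨f1, f2⟩ := hjfacts j hj
          rw [hveq, habs, habs]
          by_cases hjlo : j < lo
          · obtain ⟨g1, g2⟩ := f1 hjlo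
            split_ifs <;> omega
          · obtain ⟨g1, g2⟩ := f2 (by omega)
            split_ifs <;> omega
      · have hveq : bStep st r = st[lo] := by rw [hbv', if_neg hC]
        refine ⟨⟨lo, hlolen, hveq.symm⟩, ?_, ?_⟩
        · intro j hj
          obtain ⟨f1, f2⟩ := hjfacts j hj
          rw [hveq, habs, habs]
          by_cases hjlo : j < lo
          · obtain ⟨g1, g2⟩ := f1 hjlo
            split_ifs <;> omega
          · obtain ⟨g1, g2⟩ := f2 (by omega)
            split_ifs <;> omega
        · intro j hj
          obtain ⟨f1, f2⟩ := hjfacts j hj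
          rw [hveq, habs, habs]
          by_cases hjlo : j < lo
          · obtain ⟨g1, g2⟩ := f1 hjlo
            split_ifs <;> omega
          · obtain ⟨g1, g2⟩ := f2 (by omega)
            split_ifs <;> omega

lemma erase_eq_eraseIdx_first (l : List Int) (v : Int) (k : Nat) (hk : k < l.length)
    (hv : l[k] = v) (hfirst : ∀ (j : Nat) (hj : j < l.length), j < k → l[j] ≠ v) :
    l.erase v = l.eraseIdx k := by
  have hidx : PySem.List.index? l v = some k := by
    rw [PySem.List.index?_eq_some_iff]
    refine ⟨l.take k, l.drop (k + 1), ?_, by simp [List.length_take]; omega, ?_⟩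
    · conv_lhs => rw [← List.take_append_drop k l]
      rw [List.drop_eq_getElem_cons hk, hv]
    · intro hmem
      obtain ⟨j, hjm, hjv⟩ := List.mem_take_iff_getElem.mp hmem
      exact hfirst j (by omega) (by omega) hjv
  have hidx' : List.idxOf? v l = some k := by
    rw [← PySem.List.index?_eq_idxOf?]; exact hidx
  simp [List.erase_eq_eraseIdx, hidx']

/-- one greedy step: A picks the same distance and leaves the same stable list as B -/
lemma step_eq (r : Int) (st : List Int) (hne : st ≠ []) (hs : st.Pairwise (· ≤ ·)) :
    ∃ (k : Nat) (hk : k < st.length),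
      aInner st r = ((k : Int), some |bStep st r - r|) ∧
      PySem.List.pop? st (k : Int) = some (st[k], st.erase (bStep st r)) ∧
      PySem.List.remove? st (bStep st r) = some (st.erase (bStep st r)) := by
  obtain ⟨k, hk, hA1, hAmin, hAfirst⟩ := aInner_char r st hne
  obtain ⟨⟨i, hi, hiv⟩, hBmin, hBfirst⟩ := bStep_char r st hne hs
  have hd : |st[k] - r| = |bStep st r - r| := by
    refine le_antisymm ?_ (hBmin k hk)
    have := hAmin i hi
    rwa [hiv] at this
  have hkv : st[k] = bStep st r := by
    have h1 : bStep st r ≤ st[k] := hBfirst k hk hd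
    have hki : k ≤ i := by
      by_contra hlt
      have h2 := hAfirst i hi (by omega)
      rw [hiv, hd] at h2
      exact lt_irrefl _ h2
    have h2 : st[k] ≤ st[i] := by
      rcases Nat.eq_or_lt_of_le hki with rfl | hlt
      · exact le_refl _
      · exact List.pairwise_iff_getElem.mp hs k i hk hi hlt
    rw [hiv] at h2
    exact le_antisymm h2 h1
  have hfirstne : ∀ (j : Nat) (hj : j < st.length), j < k → st[j] ≠ bStep st r := by
    intro j hj hjk heq
    have h2 := hAfirst j hj hjk
    rw [heq, ← hkv] at h2
    exact lt_irrefl _ h2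
  have herase : st.erase (bStep st r) = st.eraseIdx k :=
    erase_eq_eraseIdx_first st (bStep st r) k hk hkv hfirstne
  refine ⟨k, hk, ?_, ?_, ?_⟩
  · rw [hA1, hd]
  · rw [PySem.List.pop?_natCast st k hk, herase]
  · rw [PySem.List.remove?_eq_some_erase st (bStep st r) (hiv ▸ List.getElem_mem hi)]

lemma loop_eq (rs : List Int) : ∀ (st : List Int) (total : Int),
    st.Pairwise (· ≤ ·) → rs.length ≤ st.length →
    aLoop rs st total = bLoop rs st total := by
  induction rs with
  | nil => intro st total _ _; rfl
  | cons r rs ih =>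
    intro st total hs hlen
    have hne : st ≠ [] := by
      intro h
      subst h
      simp at hlen
    obtain ⟨k, hk, h1, h2, h3⟩ := step_eq r st hne hs
    have hmem : bStep st r ∈ st := by
      by_contra hnm
      rw [(PySem.List.remove?_eq_none_iff st (bStep st r)).mpr hnm] at h3
      simp at h3
    simp only [aLoop, bLoop, h1, h2, h3, Option.getD_some]
    apply ih
    · exact hs.sublist List.erase_sublist
    · have := List.length_erase_of_mem hmem
      simp only [List.length_cons] at hlen
      omega

-- ===== VERDICT (by name: the statement is the Claim_ definition above) =====
theorem min_moves_to_stables_spec : Claim_equal_min_moves_to_stables := by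
  intro reindeer stables _ hpre
  unfold Spec_min_moves_to_stables min_moves_to_stables min_moves_to_stables_alt
  apply loop_eq
  · exact PySem.List.sorted_pairwise stables (fun x => x)
  · simpa [PySem.List.length_sorted] using hpre
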